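-- pv_equiv track=rewrite | github.com/phamkhanh07/GuiApp | sp3.py | raice_Number
-- ===== SOURCE A (Python) =====
-- def raice_Number(s, l):
--     n = 1
--     while s in l:
--         n += 1
--         name = s.split('.')[0] + str(n) + '.' + s.split('.')[1]
--         if name not in l:
--             name = s.split('.')[0] + str(n) + '.' + s.split('.')[1]
--             return name
--             break
-- ===== SOURCE B (Python) =====
-- def raice_Number(s, l):
--     # One pass over l building the set of "middle" strings of names shaped
--     # base + mid + '.' + ext, then count n = 2, 3, ... until str(n) is unused.
--     if s not in l:
--         return None
--     parts = s.split('.')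
--     base, suffix = parts[0], '.' + parts[1]
--     used = set()
--     for name in l:
--         if name.startswith(base) and name.endswith(suffix) and len(name) >= len(base) + len(suffix):
--             used.add(name[len(base):len(name) - len(suffix)])
--     n = 2
--     while str(n) in used:
--         n += 1
--     return base + str(n) + suffix
-- ===== Notes on version B (the rewrite author's own statement) =====
-- stated objective: alternative
-- what changed: Instead of regenerating the candidate name and rescanning l for every counter value, B makes one pass over l collecting the set of middle strings of names shaped base+mid+'.'+ext, then counts n=2,3,... until str(n) is not in that set.
import Mathlib
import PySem

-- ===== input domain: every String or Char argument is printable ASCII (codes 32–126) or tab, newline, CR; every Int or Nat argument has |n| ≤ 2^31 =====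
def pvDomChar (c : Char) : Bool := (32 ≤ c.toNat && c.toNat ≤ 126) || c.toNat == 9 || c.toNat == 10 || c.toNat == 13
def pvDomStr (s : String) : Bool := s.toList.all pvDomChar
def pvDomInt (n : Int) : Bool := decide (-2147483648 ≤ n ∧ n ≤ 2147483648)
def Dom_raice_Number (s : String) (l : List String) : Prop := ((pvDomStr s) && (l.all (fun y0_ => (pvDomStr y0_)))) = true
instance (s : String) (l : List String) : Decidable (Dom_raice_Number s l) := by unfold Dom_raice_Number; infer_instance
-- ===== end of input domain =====

-- B replaces A's regenerate-candidate-and-rescan-l loop by one pass over l collecting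
-- the set of middle strings of names shaped base+mid+'.'+ext, then counts n=2,3,…
-- until str(n) is unused; return values only (neither program mutates its arguments).

-- ===== PORT A =====
-- A's while loop; fuel l.length+1 is a totality guard only (the candidate names for
-- distinct n are pairwise distinct, so l.length+1 of them cannot all be members of l)
def raiceLoopA (s : String) (l : List String) : Nat → Int → Option String
  | 0, _ => none  -- fuel exhausted (unreachable)
  | fuel+1, n =>
    if s ∈ l then
      -- n += 1; name = s.split('.')[0] + str(n) + '.' + s.split('.')[1]
      match PySem.List.pyGet? ((PySem.Str.split? s ".").getD []) 0,
            PySem.List.pyGet? ((PySem.Str.split? s ".").getD []) 1 with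
      | some b, some e =>
        let name := b ++ PySem.Int.toStr (n + 1) ++ "." ++ e
        if name ∈ l then raiceLoopA s l fuel (n + 1) else some name
      | _, _ => none  -- IndexError in Python (s contains no '.'); excluded by Pre_
    else none

def raice_Number (s : String) (l : List String) : Option String :=
  raiceLoopA s l (l.length + 1) 1

-- ===== PORT B =====
-- one pass over l: used = { name[len(base) : len(name)-len(suffix)] | qualifying name in l }
def raiceUsed (l : List String) (base suffix : String) : PySem.Set String :=
  l.foldl (fun acc name =>
    if PySem.Str.startswith name base && PySem.Str.endswith name suffix
        && decide (PySem.Str.len base + PySem.Str.len suffix ≤ PySem.Str.len name)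
    then PySem.Set.add acc
           (PySem.Str.slice name (some (PySem.Str.len base))
              (some (PySem.Str.len name - PySem.Str.len suffix)))
    else acc) PySem.Set.empty

-- while str(n) in used: n += 1;  fuel l.length+1 is a totality guard only
-- (used holds at most l.length distinct strings)
def raiceLoopB (used : PySem.Set String) (base suffix : String) : Nat → Int → Option String
  | 0, _ => none  -- fuel exhausted (unreachable)
  | fuel+1, n =>
    if PySem.Set.contains used (PySem.Int.toStr n)
    then raiceLoopB used base suffix fuel (n + 1)
    else some (base ++ PySem.Int.toStr n ++ suffix)

def raice_Number_alt (s : String) (l : List String) : Option String :=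
  if s ∉ l then none
  else
    match PySem.List.pyGet? ((PySem.Str.split? s ".").getD []) 0,
          PySem.List.pyGet? ((PySem.Str.split? s ".").getD []) 1 with
    | some base, some ext =>
      let suffix := "." ++ ext
      raiceLoopB (raiceUsed l base suffix) base suffix (l.length + 1) 2
    | _, _ => none  -- IndexError in Python; excluded by Pre_

-- ===== PRECONDITION & SPEC =====
-- Pre_ excludes only the inputs where Python A raises IndexError: s ∈ l while s
-- contains no '.' (then s.split('.') has a single part and [1] is out of range).
def Pre_raice_Number (s : String) (l : List String) : Prop :=
  s ∈ l → 2 ≤ ((PySem.Str.split? s ".").getD []).length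
instance (s : String) (l : List String) : Decidable (Pre_raice_Number s l) := by
  unfold Pre_raice_Number; infer_instance

def pvWitness_raice_Number : String × List String := ("a.txt", ["a.txt", "a2.txt"])

def Spec_raice_Number (s : String) (l : List String) (out : Option String) : Prop :=
  out = raice_Number_alt s l
instance (s : String) (l : List String) (out : Option String) :
    Decidable (Spec_raice_Number s l out) := by unfold Spec_raice_Number; infer_instance

-- ===== CLAIM (what is proved, stated in full; the proofs are below) =====
def Claim_equal_raice_Number : Prop :=
  ∀ (s : String) (l : List String), Dom_raice_Number s l → Pre_raice_Number s l →
    Spec_raice_Number s l (raice_Number s l)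

-- ===== LEMMAS AND PROOFS =====

-- decomposition core, on List Char: the three qualifier tests plus the middle slice
-- pin name down to exactly base ++ t ++ suffix
theorem raice_core (cs bs ps ts : List Char) :
    (bs <+: cs ∧ ps <:+ cs ∧ bs.length + ps.length ≤ cs.length ∧
      (cs.drop bs.length).take (cs.length - ps.length - bs.length) = ts)
    ↔ cs = bs ++ ts ++ ps := by
  constructor
  · rintro ⟨hpre, hsuf, hlen, hmid⟩
    obtain ⟨r, hr⟩ := hpre
    obtain ⟨q, hq⟩ := hsuf
    have hbq : bs <+: q := by
      apply List.prefix_of_prefix_length_le ⟨r, hr⟩ ⟨ps, hq⟩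
      have := congrArg List.length hq
      simp at this; omega
    obtain ⟨m, hm⟩ := hbq
    have hcs : cs = bs ++ m ++ ps := by rw [← hq, ← hm, List.append_assoc]
    have hrm : cs.drop bs.length = m ++ ps := by
      rw [hcs, List.append_assoc, List.drop_left]
    have hlm : cs.length - ps.length - bs.length = m.length := by
      have := congrArg List.length hcs; simp at this; omega
    rw [hrm, hlm, List.take_left] at hmid
    rw [hcs, hmid]
  · rintro rfl
    refine ⟨by rw [List.append_assoc]; exact List.prefix_append _ _, ?_, ?_, ?_⟩
    · exact List.suffix_append _ _
    · simp
    · rw [List.append_assoc, List.drop_left]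
      have : (bs ++ (ts ++ ps)).length - ps.length - bs.length = ts.length := by simp; omega
      rw [this, List.take_left]

-- string-level per-name characterisation of B's qualifier-and-slice
theorem raice_qual (name base p t : String) :
    ((PySem.Str.startswith name base && PySem.Str.endswith name p
        && decide (PySem.Str.len base + PySem.Str.len p ≤ PySem.Str.len name)) = true ∧
      PySem.Str.slice name (some (PySem.Str.len base))
        (some (PySem.Str.len name - PySem.Str.len p)) = t)
    ↔ name = base ++ t ++ p := by
  by_cases hlen : base.toList.length + p.toList.length ≤ name.toList.length
  · have h1 : PySem.Str.len base = ((base.toList.length : Nat) : Int) := PySem.Str.len_eq base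
    have h2 : PySem.Str.len name - PySem.Str.len p
        = ((name.toList.length - p.toList.length : Nat) : Int) := by
      rw [PySem.Str.len_eq, PySem.Str.len_eq]; omega
    have hsl : (PySem.Str.slice name (some (PySem.Str.len base))
        (some (PySem.Str.len name - PySem.Str.len p))).toList
        = (name.toList.drop base.toList.length).take
            (name.toList.length - p.toList.length - base.toList.length) := by
      rw [h1, h2, PySem.Str.toList_slice, PySem.Chars.slice_eq_listSlice,
        PySem.List.slice_natCast]
    constructor
    · rintro ⟨hq, hmid⟩
      simp only [Bool.and_eq_true, decide_eq_true_iff, PySem.Str.startswith_eq,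
        PySem.Str.endswith_eq, PySem.Chars.startswith_iff, PySem.Chars.endswith_iff] at hq
      have := (raice_core name.toList base.toList p.toList t.toList).mp
        ⟨hq.1.1, hq.1.2, hlen, by rw [← hsl, hmid]⟩
      apply String.toList_inj.mp
      simpa using this
    · rintro rfl
      have hcs : (base ++ t ++ p).toList = base.toList ++ t.toList ++ p.toList := by simp
      have := (raice_core (base ++ t ++ p).toList base.toList p.toList t.toList).mpr hcs
      obtain ⟨hpre, hsuf, _, hmid⟩ := this
      refine ⟨?_, ?_⟩
      · simp only [Bool.and_eq_true, decide_eq_true_iff, PySem.Str.startswith_eq,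
          PySem.Str.endswith_eq, PySem.Chars.startswith_iff, PySem.Chars.endswith_iff,
          PySem.Str.len_eq]
        refine ⟨⟨hpre, hsuf⟩, by omega⟩
      · apply String.toList_inj.mp
        rw [hsl, hmid]
  · constructor
    · rintro ⟨hq, -⟩
      simp only [Bool.and_eq_true, decide_eq_true_iff, PySem.Str.len_eq] at hq
      exact absurd (by exact_mod_cast hq.2) hlen
    · rintro rfl
      exact absurd (by simp : base.toList.length + p.toList.length ≤ (base ++ t ++ p).toList.length) hlen

-- membership in B's one-pass set, generalized over the fold's accumulator
theorem raice_used_mem_aux (base p t : String) :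
    ∀ (l : List String) (acc : PySem.Set String),
      t ∈ l.foldl (fun acc name =>
        if PySem.Str.startswith name base && PySem.Str.endswith name p
            && decide (PySem.Str.len base + PySem.Str.len p ≤ PySem.Str.len name)
        then PySem.Set.add acc
               (PySem.Str.slice name (some (PySem.Str.len base))
                  (some (PySem.Str.len name - PySem.Str.len p)))
        else acc) acc
      ↔ t ∈ acc ∨ base ++ t ++ p ∈ l := by
  intro l
  induction l with
  | nil => simp [List.foldl]
  | cons name rest ih =>
    intro acc
    simp only [List.foldl_cons, ih, List.mem_cons]
    by_cases hc : (PySem.Str.startswith name base && PySem.Str.endswith name p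
        && decide (PySem.Str.len base + PySem.Str.len p ≤ PySem.Str.len name)) = true
    · rw [if_pos hc, PySem.Set.mem_add]
      constructor
      · rintro (⟨h | h⟩ | h)
        · exact Or.inl h
        · exact Or.inr (Or.inl (((raice_qual name base p t).mp ⟨hc, h.symm⟩).symm))
        · exact Or.inr (Or.inr h)
      · rintro (h | h | h)
        · exact Or.inl (Or.inl h)
        · exact Or.inl (Or.inr (((raice_qual name base p t).mpr h.symm).2).symm)
        · exact Or.inr h
    · rw [if_neg hc]
      constructor
      · rintro (h | h)
        · exact Or.inl h
        · exact Or.inr (Or.inr h)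
      · rintro (h | h | h)
        · exact Or.inl h
        · exact absurd ((raice_qual name base p t).mpr h.symm).1 hc
        · exact Or.inr h

-- membership in raiceUsed = membership of the assembled name in l
theorem raice_used_mem (l : List String) (base p t : String) :
    t ∈ raiceUsed l base p ↔ base ++ t ++ p ∈ l := by
  rw [raiceUsed, raice_used_mem_aux]
  simp [PySem.Set.empty]

-- the two loops agree step by step once the membership tests are identified
theorem raice_loop_eq (s : String) (l : List String) (b e : String)
    (hs : s ∈ l)
    (hb : PySem.List.pyGet? ((PySem.Str.split? s ".").getD []) 0 = some b)
    (he : PySem.List.pyGet? ((PySem.Str.split? s ".").getD []) 1 = some e) :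
    ∀ (fuel : Nat) (n : Int),
      raiceLoopA s l fuel n = raiceLoopB (raiceUsed l b ("." ++ e)) b ("." ++ e) fuel (n + 1) := by
  intro fuel
  induction fuel with
  | zero => intro n; rfl
  | succ fuel ih =>
    intro n
    rw [raiceLoopA, raiceLoopB, if_pos hs, hb, he]
    dsimp only
    have hname : b ++ PySem.Int.toStr (n + 1) ++ "." ++ e
        = b ++ PySem.Int.toStr (n + 1) ++ ("." ++ e) := by
      rw [String.append_assoc]
    have hmem : (b ++ PySem.Int.toStr (n + 1) ++ "." ++ e ∈ l)
        ↔ PySem.Set.contains (raiceUsed l b ("." ++ e)) (PySem.Int.toStr (n + 1)) = true := by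
      rw [PySem.Set.contains_iff, raice_used_mem, hname]
    by_cases hin : b ++ PySem.Int.toStr (n + 1) ++ "." ++ e ∈ l
    · simp only [hin, if_pos, if_pos (hmem.mp hin), ih]
    · rw [if_neg hin, if_neg (fun hcontra => hin (hmem.mpr hcontra))]
      simp only [hname]

-- ===== VERDICT (by name: the statement is the Claim_ definition above) =====
theorem raice_Number_spec : Claim_equal_raice_Number := by
  intro s l _ hpre
  show raice_Number s l = raice_Number_alt s l
  by_cases hs : s ∈ l
  · have hlen := hpre hs
    set parts := (PySem.Str.split? s ".").getD [] with hparts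
    have hb : PySem.List.pyGet? parts 0 = some (parts[0]'(by omega)) := by
      rw [PySem.List.pyGet?_eq_some_getElem parts (by norm_num) (by exact_mod_cast by omega)]
      simp
    have he : PySem.List.pyGet? parts 1 = some (parts[1]'(by omega)) := by
      rw [PySem.List.pyGet?_eq_some_getElem parts (by norm_num) (by exact_mod_cast by omega)]
      simp
    rw [raice_Number, raice_Number_alt, if_neg (not_not_intro hs),
      raice_loop_eq s l _ _ hs hb he (l.length + 1) 1, hb, he]
    norm_num
  · rw [raice_Number, raice_Number_alt, if_pos hs, raiceLoopA, if_neg hs]
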